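-- pv_equiv track=rewrite | github.com/PKing70/data558 | knn_our.py | getVotes
-- ===== SOURCE A (Python) =====
-- import operator
--
-- def getVotes(neighbors, y_train):
--     """
--     Get the vote from each neighbor to determine which ones are nearer
--     Parameters:
--         neighbors   The list of neighbors produced by getNeighbors.
--         y_train     The corresponding labels to any given neighbor.
--
--     Returns:
--         The results of the voting, sorted by magnitude of distance
--     """
--     votes = {}
--
--     for x in range(len(neighbors)):    # For each neighbor
--         vote = y_train[neighbors[x]]   # its vote is its y label
--
--         if vote in votes:
--             votes[vote] += 1           # increment its vote count
--         else:
--             votes[vote] = 1            # add it to the vote list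
--
--     sortedVotes = sorted(votes.items(), key=operator.itemgetter(1),
--                          reverse=True) # Sort votes largest to smallest
--
--     return int(sortedVotes[0][0])      # Return as integer the top vote getter
-- ===== SOURCE B (Python) =====
-- import operator
--
-- def getVotes(neighbors, y_train):
--     # Simpler: count votes in one pass over neighbors, then pick the winner
--     # with a single linear max scan instead of sorting all labels.
--     votes = {}
--     for idx in neighbors:
--         lbl = y_train[idx]
--         votes[lbl] = votes.get(lbl, 0) + 1
--     top = max(votes.items(), key=operator.itemgetter(1))
--     return int(top[0])
-- ===== Notes on version B (the rewrite author's own statement) =====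
-- stated objective: simpler
-- what changed: B iterates directly over neighbors (no range/index loop), counts with dict.get, and replaces the reverse stable sort of all distinct labels by a single linear max scan (max returns the first maximal item, exactly the head of the stable reverse sort).
import Mathlib
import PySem

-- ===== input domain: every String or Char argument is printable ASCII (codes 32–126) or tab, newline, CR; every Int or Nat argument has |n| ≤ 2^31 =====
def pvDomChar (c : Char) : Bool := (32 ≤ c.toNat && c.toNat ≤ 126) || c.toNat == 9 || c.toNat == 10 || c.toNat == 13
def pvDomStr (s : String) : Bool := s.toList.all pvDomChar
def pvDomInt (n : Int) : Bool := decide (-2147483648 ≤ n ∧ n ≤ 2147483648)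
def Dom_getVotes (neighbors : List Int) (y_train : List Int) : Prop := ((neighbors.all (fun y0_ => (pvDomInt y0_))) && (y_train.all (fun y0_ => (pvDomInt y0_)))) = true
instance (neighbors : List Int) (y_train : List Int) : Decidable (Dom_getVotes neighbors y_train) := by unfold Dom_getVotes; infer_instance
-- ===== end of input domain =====

-- B counts votes in one direct pass over `neighbors` and picks the winner with a single
-- linear max scan instead of A's reverse stable sort of all distinct labels (simpler).

-- ===== PORT A =====
def getVotes (neighbors : List Int) (y_train : List Int) : Int :=
  let votes : PySem.Dict Int Int :=
    (PySem.List.pyRange 0 (PySem.List.len neighbors)).foldl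
      (fun d x =>
        let vote := ((PySem.List.pyGet? neighbors x).bind
                      (fun i => PySem.List.pyGet? y_train i)).getD 0
        match d.get? vote with
        | some c => d.insert vote (c + 1)   -- votes[vote] += 1
        | none   => d.insert vote 1)        -- votes[vote] = 1
      PySem.Dict.empty
  let sortedVotes := PySem.List.sorted votes.items (fun p => p.2) true
  ((PySem.List.pyGet? sortedVotes 0).getD (0, 0)).1   -- sortedVotes[0][0]; index valid under Pre_

-- ===== PORT B =====
def getVotes_alt (neighbors : List Int) (y_train : List Int) : Int :=
  let votes : PySem.Dict Int Int :=
    neighbors.foldl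
      (fun d idx =>
        let lbl := (PySem.List.pyGet? y_train idx).getD 0
        d.insert lbl (d.getD lbl 0 + 1))    -- votes[lbl] = votes.get(lbl, 0) + 1
      PySem.Dict.empty
  match PySem.List.max? votes.items (fun p => p.2) with
  | some top => top.1                        -- max(votes.items(), key=itemgetter(1))[0]
  | none     => 0                            -- max on empty raises; outside Pre_

-- ===== PRECONDITION & SPEC =====
-- Pre_ excludes exactly the inputs on which A raises: an empty neighbors list
-- (sortedVotes[0] -> IndexError) and a neighbor index out of range for y_train (IndexError).
def Pre_getVotes (neighbors : List Int) (y_train : List Int) : Prop :=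
  neighbors ≠ [] ∧ ∀ i ∈ neighbors, PySem.Raise.InRange y_train.length i
instance (neighbors : List Int) (y_train : List Int) : Decidable (Pre_getVotes neighbors y_train) := by unfold Pre_getVotes; infer_instance

def pvWitness_getVotes : List Int × List Int := ([0, 2, 2, -1], [5, 7, 5, 7])

def Spec_getVotes (neighbors : List Int) (y_train : List Int) (out : Int) : Prop := out = getVotes_alt neighbors y_train
instance (neighbors : List Int) (y_train : List Int) (out : Int) : Decidable (Spec_getVotes neighbors y_train out) := by unfold Spec_getVotes; infer_instance

-- ===== CLAIM (what is proved, stated in full; the proofs are below) =====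
def Claim_equal_getVotes : Prop := ∀ (neighbors : List Int) (y_train : List Int), Dom_getVotes neighbors y_train → Pre_getVotes neighbors y_train → Spec_getVotes neighbors y_train (getVotes neighbors y_train)

-- ===== LEMMAS AND PROOFS =====

-- head of an insertBy step, as one comparison with the previous head
theorem head?_insertBy {α : Type} (before : α → α → Bool) (x : α) (acc : List α) :
    (PySem.List.insertBy before x acc).head? =
      some (match acc with
            | [] => x
            | y :: _ => if before x y then x else y) := by
  cases acc with
  | nil => rfl
  | cons y ys => simp only [PySem.List.insertBy]; split <;> simp_all

-- the head of the insertBy fold IS the running first-max fold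
theorem head?_foldl_insertBy {α : Type} (key : α → Int) (xs : List α) (acc : List α) :
    (xs.foldl (fun a x => PySem.List.insertBy (fun a b => decide (key b < key a)) x a) acc).head? =
      xs.foldl (fun o x =>
        match o with
        | none => some x
        | some m => if key m < key x then some x else some m) acc.head? := by
  induction xs generalizing acc with
  | nil => rfl
  | cons x t ih =>
      simp only [List.foldl_cons]
      rw [ih]
      congr 1
      rw [head?_insertBy]
      cases acc with
      | nil => rfl
      | cons y ys =>
          simp only [List.head?_cons]
          by_cases h : key y < key x <;> simp [h]

-- head of Python's stable reverse sort = Python's max (first maximal element)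
theorem head?_sorted_rev_eq_max? {α : Type} (xs : List α) (key : α → Int) :
    (PySem.List.sorted xs key true).head? = PySem.List.max? xs key := by
  simp only [PySem.List.sorted, PySem.List.max?]
  exact head?_foldl_insertBy key xs []

-- A's in-range read of neighbors always succeeds
theorem pyGet?_eq_some_pyGetD (xs : List Int) (x : Int) (h0 : 0 ≤ x) (h1 : x < (xs.length : Int)) :
    PySem.List.pyGet? xs x = some (PySem.List.pyGetD xs x 0) := by
  rw [PySem.List.pyGetD_eq_getElem xs 0 h0 h1]
  simp only [PySem.List.pyGet?, PySem.List.pyIdx?, if_pos h0, if_pos h1, Option.bind_some]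
  exact List.getElem?_eq_getElem (by omega)

-- A's branch on `vote in votes` is B's unconditional insert with get-default
theorem insert_match_eq_insert_getD (d : PySem.Dict Int Int) (v : Int) :
    (match d.get? v with
     | some c => d.insert v (c + 1)
     | none   => d.insert v 1) = d.insert v (d.getD v 0 + 1) := by
  cases h : d.get? v <;> simp [PySem.Dict.getD_eq_get?_getD, h]

-- the step both counting loops perform, as a function of the neighbor's label index
def pvStep (y_train : List Int) (d : PySem.Dict Int Int) (v : Int) : PySem.Dict Int Int :=
  d.insert ((PySem.List.pyGet? y_train v).getD 0)
    (d.getD ((PySem.List.pyGet? y_train v).getD 0) 0 + 1)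

-- the two ports build the SAME vote dict
theorem votes_eq (neighbors y_train : List Int) :
    (PySem.List.pyRange 0 (PySem.List.len neighbors)).foldl
      (fun d x =>
        match d.get? (((PySem.List.pyGet? neighbors x).bind
                        (fun i => PySem.List.pyGet? y_train i)).getD 0) with
        | some c => d.insert (((PySem.List.pyGet? neighbors x).bind
                        (fun i => PySem.List.pyGet? y_train i)).getD 0) (c + 1)
        | none   => d.insert (((PySem.List.pyGet? neighbors x).bind
                        (fun i => PySem.List.pyGet? y_train i)).getD 0) 1)
      (PySem.Dict.empty : PySem.Dict Int Int) =
    neighbors.foldl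
      (fun d idx =>
        d.insert ((PySem.List.pyGet? y_train idx).getD 0)
          (d.getD ((PySem.List.pyGet? y_train idx).getD 0) 0 + 1))
      PySem.Dict.empty := by
  rw [PySem.List.foldl_congr_mem _ _
    (g := fun d x => pvStep y_train d (PySem.List.pyGetD neighbors x 0))]
  · rw [← List.foldl_map (f := fun x => PySem.List.pyGetD neighbors x 0) (g := pvStep y_train),
        PySem.List.map_pyGetD_pyRange_zero]
    exact PySem.List.foldl_congr_mem _ _ _ _ (fun acc x _ => rfl)
  · intro acc x hx
    rw [PySem.List.mem_pyRange_one] at hx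
    have hx1 : x < (neighbors.length : Int) := by
      simpa [PySem.List.len] using hx.2
    simp only [pyGet?_eq_some_pyGetD neighbors x hx.1 hx1, Option.bind_some, pvStep]
    exact insert_match_eq_insert_getD acc _

theorem pyGet?_zero_eq_head? (l : List (Int × Int)) : PySem.List.pyGet? l 0 = l.head? := by
  cases l <;> simp [PySem.List.pyGet?, PySem.List.pyIdx?]

theorem getD_fst_eq_match (o : Option (Int × Int)) :
    (o.getD (0, 0)).1 = match o with | some top => top.1 | none => 0 := by
  cases o <;> rfl

-- ===== VERDICT (by name: the statement is the Claim_ definition above) =====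
theorem getVotes_spec : Claim_equal_getVotes := by
  intro neighbors y_train _ _
  show getVotes neighbors y_train = getVotes_alt neighbors y_train
  simp only [getVotes, getVotes_alt]
  rw [votes_eq, pyGet?_zero_eq_head?, head?_sorted_rev_eq_max?]
  exact getD_fst_eq_match _
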